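-- pv_equiv track=rewrite | github.com/cvelazquezr/RESICO-LiFUSO | 5 - process_inputs/2 - resico_application/5 - process_predictions.py | transform_tags
-- ===== SOURCE A (Python) =====
-- def transform_tags(tags_str):
--     tags = ""
--
--     for char in tags_str:
--         if char == '<' or char == '>':
--             tags += ' '
--         else:
--             tags += char
--     tags_formatted = list(filter(lambda char: len(char) > 0, tags.split(" ")))
--
--     return tags_formatted
-- ===== SOURCE B (Python) =====
-- def transform_tags(tags_str):
--     tokens = []
--     buf = ""
--     for char in tags_str:
--         if char == '<' or char == '>' or char == ' ':
--             if buf: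
--                 tokens.append(buf)
--             buf = ""
--         else:
--             buf += char
--     if buf:
--         tokens.append(buf)
--     return tokens
-- ===== Notes on version B (the rewrite author's own statement) =====
-- stated objective: simpler
-- what changed: Single-pass tokenizer with a buffer that emits tokens directly, instead of building a bracket-to-space translated copy of the string and then splitting it on spaces and filtering out empty pieces.
import Mathlib
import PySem

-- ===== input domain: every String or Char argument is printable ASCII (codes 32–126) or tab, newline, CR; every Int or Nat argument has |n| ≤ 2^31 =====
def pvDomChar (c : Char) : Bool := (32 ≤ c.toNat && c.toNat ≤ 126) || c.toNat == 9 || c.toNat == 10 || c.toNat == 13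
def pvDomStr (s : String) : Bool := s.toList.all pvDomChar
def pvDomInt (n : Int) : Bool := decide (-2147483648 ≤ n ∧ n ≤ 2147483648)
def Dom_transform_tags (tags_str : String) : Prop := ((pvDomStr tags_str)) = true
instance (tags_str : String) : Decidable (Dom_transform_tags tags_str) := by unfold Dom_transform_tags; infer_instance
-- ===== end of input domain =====

-- B is a single-pass tokenizer emitting tokens directly (simpler decomposition); A builds a
-- bracket-to-space translated string, splits it on ' ' and filters out empty pieces.

-- ===== PORT A =====
def transform_tags (tags_str : String) : List String :=
  -- tags built char by char (string as List Char), '<'/'>' replaced by ' '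
  let tags : List Char :=
    tags_str.toList.foldl (fun t c => t ++ [if c == '<' || c == '>' then ' ' else c]) []
  -- tags.split(" ") via PySem.Chars.splitOn, then filter len > 0
  ((PySem.Chars.splitOn tags [' ']).filter (fun w => decide (0 < PySem.Chars.len w))).map
    String.ofList

-- ===== PORT B =====
-- buffer/accumulator loop: flush the buffer at '<', '>' or ' ', else extend it; flush at the end
def transformTagsAltGo : List Char → List Char → List String → List String
  | [], buf, acc => if buf.isEmpty then acc else acc ++ [String.ofList buf]
  | c :: rest, buf, acc =>
    if c == '<' || c == '>' || c == ' ' then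
      transformTagsAltGo rest [] (if buf.isEmpty then acc else acc ++ [String.ofList buf])
    else
      transformTagsAltGo rest (buf ++ [c]) acc

def transform_tags_alt (tags_str : String) : List String :=
  transformTagsAltGo tags_str.toList [] []

-- ===== PRECONDITION & SPEC =====
def Spec_transform_tags (tags_str : String) (out : List String) : Prop := out = transform_tags_alt tags_str
instance (tags_str : String) (out : List String) : Decidable (Spec_transform_tags tags_str out) := by unfold Spec_transform_tags; infer_instance

-- ===== CLAIM (what is proved, stated in full; the proofs are below) =====
def Claim_equal_transform_tags : Prop := ∀ (tags_str : String), Dom_transform_tags tags_str → Spec_transform_tags tags_str (transform_tags tags_str)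

-- ===== LEMMAS AND PROOFS =====

-- canonical splitter on the three delimiter characters, keeping empty pieces
def pvTok : List Char → List (List Char)
  | [] => [[]]
  | c :: r =>
    if c == '<' || c == '>' || c == ' ' then [] :: pvTok r
    else (pvTok r).modifyHead (c :: ·)

-- the character substitution A applies
def pvSub (c : Char) : Char := if c == '<' || c == '>' then ' ' else c

theorem pvFoldl_build (l : List Char) (t : List Char) :
    l.foldl (fun t c => t ++ [if c == '<' || c == '>' then ' ' else c]) t
      = t ++ l.map pvSub := by
  induction l generalizing t with
  | nil => simp
  | cons c r ih =>
    simp only [List.foldl]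
    rw [ih]
    simp [pvSub]

theorem pvModifyHead_id {α : Type} (l : List α) :
    (l.modifyHead (fun x => x)) = l := by
  cases l <;> simp

theorem pvModifyHead_modifyHead {α : Type} (f g : α → α) (l : List α) :
    (l.modifyHead g).modifyHead f = l.modifyHead (f ∘ g) := by
  cases l <;> simp

theorem pvGo_eq (fuel : Nat) :
    ∀ (l cur : List Char) (accs : List (List Char)), l.length ≤ fuel →
    PySem.Chars.splitOn.go [' '] fuel (l.map pvSub) cur accs
      = accs.reverse ++ (pvTok l).modifyHead (cur.reverse ++ ·) := by
  induction fuel with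
  | zero =>
    intro l cur accs h
    have hl : l = [] := List.eq_nil_of_length_eq_zero (Nat.le_zero.mp h)
    subst hl
    simp [PySem.Chars.splitOn.go, pvTok]
  | succ n ih =>
    intro l cur accs h
    cases l with
    | nil => simp [PySem.Chars.splitOn.go, pvTok]
    | cons c r =>
      simp only [List.map_cons]
      rw [PySem.Chars.splitOn.go]
      by_cases hd : c == '<' || c == '>' || c == ' '
      · have hsub : pvSub c = ' ' := by
          simp only [pvSub]
          rcases Bool.or_eq_true_iff.mp hd with h' | h'
          · simp [h']
          · have : c = ' ' := by simpa using h'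
            simp [this]
        have hpre : List.isPrefixOf [' '] (pvSub c :: r.map pvSub) = true := by
          simp [List.isPrefixOf, hsub]
        simp only [hsub]
        have : List.drop 1 (' ' :: r.map pvSub) = r.map pvSub := by simp
        rw [show (List.length [' ']) = 1 from rfl, this,
          ih r [] (cur.reverse :: accs) (by simpa using Nat.le_of_succ_le_succ h)]
        simp [pvTok, hd, pvModifyHead_id]
      · have hsub : pvSub c = c := by simp [pvSub] at hd ⊢; tauto
        have hne : c ≠ ' ' := by
          intro hc; exact hd (by simp [hc])
        have hpre : List.isPrefixOf [' '] (pvSub c :: r.map pvSub) = false := by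
          simp only [List.isPrefixOf, hsub]
          simp only [Bool.and_eq_false_iff]
          left; simpa [beq_iff_eq] using fun h' => hne h'.symm
        rw [hsub] at hpre
        simp only [hsub, hpre, Bool.false_eq_true, if_false]
        rw [ih r (c :: cur) accs (by simpa using Nat.le_of_succ_le_succ h)]
        simp only [pvTok, hd, Bool.false_eq_true, if_false, pvModifyHead_modifyHead]
        congr 2
        funext x
        simp

theorem pvSplitOn_eq (l : List Char) :
    PySem.Chars.splitOn (l.map pvSub) [' '] = pvTok l := by
  rw [PySem.Chars.splitOn, pvGo_eq ((l.map pvSub).length + 1) l [] [] (by simp)]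
  cases h : pvTok l <;> simp

theorem pvAltGo_eq (l : List Char) :
    ∀ (buf : List Char) (acc : List String),
    transformTagsAltGo l buf acc
      = acc ++ (((pvTok l).modifyHead (buf ++ ·)).filter
          (fun w => decide (0 < w.length))).map String.ofList := by
  induction l with
  | nil =>
    intro buf acc
    cases buf <;> simp [transformTagsAltGo, pvTok, List.filter]
  | cons c r ih =>
    intro buf acc
    by_cases hd : c == '<' || c == '>' || c == ' '
    · simp only [transformTagsAltGo, hd]
      rw [ih]
      cases buf <;> simp [pvTok, hd, pvModifyHead_id]
    · simp only [transformTagsAltGo, hd, Bool.false_eq_true, if_false, ih]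
      simp only [pvTok, hd, Bool.false_eq_true, if_false, pvModifyHead_modifyHead]
      congr 3
      cases pvTok r <;> simp

-- ===== VERDICT (by name: the statement is the Claim_ definition above) =====
theorem transform_tags_spec : Claim_equal_transform_tags := by
  intro s _
  simp only [Spec_transform_tags, transform_tags, transform_tags_alt, pvFoldl_build,
    List.nil_append, pvSplitOn_eq, pvAltGo_eq, pvModifyHead_id, PySem.Chars.len]
  congr 1
  apply List.filter_congr
  intro w _
  simp
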